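-- pv_equiv track=rewrite | github.com/Rethy729/Rosalind_BA | BA4/BA4B/BA4B.py | ORF_generation
-- ===== SOURCE A (Python) =====
-- def complement(strand):
--     comp = {'A':'T', 'C':'G', 'G':'C', 'T':'A'}
--     complement = '' #3` -> 5`
--     for base in strand:
--         complement += comp[base]
--
--     comp_strand = complement[::-1] #5` -> 3`
--     return comp_strand #returns reverse complement in 5` -> 3`
--
-- def ORF_generation(strand):
--     strand_set = [strand, complement(strand)]
--     frame_set = []
--     for template in strand_set:
--         for i in range(3): # i = 0, 1, 2
--             frame = []
--             for j in range(i, len(template)-2, 3):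
--                 codon = template[j:j+3]
--                 frame.append(codon)
--             frame_set.append(frame)
--     return frame_set
-- ===== SOURCE B (Python) =====
-- def ORF_generation(strand):
--     comp = {'A': 'T', 'C': 'G', 'G': 'C', 'T': 'A'}
--     rev_comp = ''.join(comp[base] for base in reversed(strand))
--     frame_set = []
--     for template in (strand, rev_comp):
--         frames = [[], [], []]
--         for j in range(len(template) - 2):
--             frames[j % 3].append(template[j:j+3])
--         frame_set.extend(frames)
--     return frame_set
-- ===== Notes on version B (the rewrite author's own statement) =====
-- stated objective: alternative
-- what changed: Replaces the per-template triple of strided inner loops (range(i, len-2, 3) for i in 0,1,2) by one linear sweep per template that dispatches each codon to frame j%3, and builds the reverse complement with a single reversed-join instead of concatenate-then-reverse.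
import Mathlib
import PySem

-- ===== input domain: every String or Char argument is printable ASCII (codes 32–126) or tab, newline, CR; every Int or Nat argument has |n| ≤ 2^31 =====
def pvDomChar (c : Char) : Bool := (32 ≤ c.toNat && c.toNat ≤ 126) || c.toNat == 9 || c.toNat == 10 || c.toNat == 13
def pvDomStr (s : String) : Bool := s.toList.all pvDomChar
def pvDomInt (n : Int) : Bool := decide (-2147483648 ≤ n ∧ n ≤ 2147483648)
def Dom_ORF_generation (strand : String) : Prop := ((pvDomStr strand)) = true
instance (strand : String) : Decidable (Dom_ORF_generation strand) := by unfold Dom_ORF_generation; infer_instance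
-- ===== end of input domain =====

-- B replaces A's three strided inner loops per template by one linear sweep dispatching
-- codons to frame j%3, and builds the reverse complement by a reversed map; same cost.
-- A raises KeyError on characters outside 'ACGT'; those inputs are excluded by Pre_.

-- ===== PORT A =====

-- the dict {'A':'T','C':'G','G':'C','T':'A'} (1-char strings modelled as Char)
def pvComp : PySem.Dict Char Char :=
  ((((PySem.Dict.empty).insert 'A' 'T').insert 'C' 'G').insert 'G' 'C').insert 'T' 'A'

-- complement(strand): build by appending comp[base], then reverse with [::-1].
-- comp[base] raises KeyError outside 'ACGT'; Pre_ excludes that, the default 'X' is never used there.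
def pvComplementA (s : List Char) : List Char :=
  let c := s.foldl (fun acc base => acc ++ [pvComp.getD base 'X']) []
  (PySem.List.slice? c none none (-1)).getD []

-- codon = template[j:j+3]
def pvCodon (tmpl : List Char) (j : Int) : String :=
  String.ofList (PySem.List.slice tmpl (some j) (some (j + 3)))

-- inner loop: for j in range(i, len(template)-2, 3): frame.append(codon)
def pvFrameA (tmpl : List Char) (i : Int) : List String :=
  (PySem.List.pyRange i ((tmpl.length : Int) - 2) 3).foldl
    (fun frame j => frame ++ [pvCodon tmpl j]) []

def ORF_generation (strand : String) : List (List String) :=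
  let strand_set : List (List Char) := [strand.toList, pvComplementA strand.toList]
  strand_set.foldl (fun frame_set template =>
    (PySem.List.pyRange 0 3 1).foldl
      (fun fs i => fs ++ [pvFrameA template i]) frame_set) []

-- ===== PORT B =====

-- rev_comp = ''.join(comp[base] for base in reversed(strand))
def pvRevCompB (s : List Char) : List Char :=
  s.reverse.map (fun base => pvComp.getD base 'X')

-- one step of the sweep: append template[j:j+3] to frames[j % 3]
def pvStepB (tmpl : List Char) (fr : List String × List String × List String) (j : Int) :
    List String × List String × List String :=
  if PySem.Int.mod j 3 = 0 then (fr.1 ++ [pvCodon tmpl j], fr.2.1, fr.2.2)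
  else if PySem.Int.mod j 3 = 1 then (fr.1, fr.2.1 ++ [pvCodon tmpl j], fr.2.2)
  else (fr.1, fr.2.1, fr.2.2 ++ [pvCodon tmpl j])

-- frames = [[],[],[]]; for j in range(len(template)-2): frames[j%3].append(codon)
def pvFramesB (tmpl : List Char) : List String × List String × List String :=
  (PySem.List.pyRange 0 ((tmpl.length : Int) - 2) 1).foldl (pvStepB tmpl) ([], [], [])

def ORF_generation_alt (strand : String) : List (List String) :=
  [strand.toList, pvRevCompB strand.toList].foldl (fun frame_set template =>
    let frames := pvFramesB template
    frame_set ++ [frames.1, frames.2.1, frames.2.2]) []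

-- ===== PRECONDITION & SPEC =====
-- Python A raises KeyError on any character outside 'ACGT' (so does B); Pre_ excludes exactly those.
def Pre_ORF_generation (strand : String) : Prop :=
  strand.toList.all (fun c => c == 'A' || c == 'C' || c == 'G' || c == 'T') = true
instance (strand : String) : Decidable (Pre_ORF_generation strand) := by
  unfold Pre_ORF_generation; infer_instance

def pvWitness_ORF_generation : String := "ATG"

def Spec_ORF_generation (strand : String) (out : List (List String)) : Prop := out = ORF_generation_alt strand
instance (strand : String) (out : List (List String)) : Decidable (Spec_ORF_generation strand out) := by unfold Spec_ORF_generation; infer_instance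

-- ===== CLAIM (what is proved, stated in full; the proofs are below) =====
def Claim_equal_ORF_generation : Prop := ∀ (strand : String), Dom_ORF_generation strand → Pre_ORF_generation strand → Spec_ORF_generation strand (ORF_generation strand)

-- ===== LEMMAS AND PROOFS =====

-- the two reverse-complement constructions agree (on every input)
lemma pvComplement_eq (s : List Char) : pvComplementA s = pvRevCompB s := by
  simp only [pvComplementA, pvRevCompB, PySem.List.foldl_append_singleton_eq_map,
    List.nil_append, PySem.List.slice?_none_none_neg_one, Option.getD_some, List.map_reverse]

-- appending the next index to a step-3 range
lemma step3_succ (i : Int) (t : Nat) (hit : i ≤ (t : Int) + 2) :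
    PySem.List.pyRange i ((t : Int) + 1) 3 =
      if (t : Int) % 3 = i % 3 then PySem.List.pyRange i (t : Int) 3 ++ [(t : Int)]
      else PySem.List.pyRange i (t : Int) 3 := by
  rw [PySem.List.pyRange_of_pos i ((t : Int) + 1) (by norm_num),
      PySem.List.pyRange_of_pos i (t : Int) (by norm_num)]
  by_cases hlt : i < (t : Int) + 1
  · rw [if_pos hlt]
    by_cases h0 : ((t : Int) - i) % 3 = 0
    · have hcond : (t : Int) % 3 = i % 3 := by omega
      have hN' : (((t : Int) + 1 - i + 3 - 1) / 3).toNat = (((t : Int) - i) / 3).toNat + 1 := by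
        omega
      have hN : (if i < (t : Int) then (((t : Int) - i + 3 - 1) / 3).toNat else 0)
          = (((t : Int) - i) / 3).toNat := by
        split_ifs with h <;> omega
      rw [if_pos hcond, hN', hN, List.range_succ, List.map_append]
      simp only [List.map_cons, List.map_nil]
      congr 2
      omega
    · have hN : (((t : Int) + 1 - i + 3 - 1) / 3).toNat
          = (if i < (t : Int) then (((t : Int) - i + 3 - 1) / 3).toNat else 0) := by
        split_ifs with h <;> omega
      rw [if_neg (by omega : ¬ ((t : Int) % 3 = i % 3)), hN]
  · rw [if_neg hlt, if_neg (by omega : ¬ ((t : Int) % 3 = i % 3)),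
        if_neg (by omega : ¬ (i < (t : Int)))]

-- the single modulo-dispatch sweep produces exactly A's three strided frames
lemma dispatch (tmpl : List Char) (t : Nat) :
    (PySem.List.pyRange 0 (t : Int) 1).foldl (pvStepB tmpl) ([], [], []) =
      ((PySem.List.pyRange 0 (t : Int) 3).map (pvCodon tmpl),
       (PySem.List.pyRange 1 (t : Int) 3).map (pvCodon tmpl),
       (PySem.List.pyRange 2 (t : Int) 3).map (pvCodon tmpl)) := by
  induction t with
  | zero => simp [PySem.List.pyRange_of_pos]
  | succ k ih =>
    have hcast : ((k + 1 : Nat) : Int) = (k : Int) + 1 := by push_cast; ring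
    rw [hcast, PySem.List.pyRange_one_succ_right (by positivity), List.foldl_append, ih]
    have hmod : PySem.Int.mod (k : Int) 3 = (k : Int) % 3 :=
      PySem.Int.mod_eq_emod_of_pos (by norm_num)
    rw [step3_succ 0 k (by omega), step3_succ 1 k (by omega), step3_succ 2 k (by omega)]
    simp only [List.foldl_cons, List.foldl_nil, pvStepB, hmod]
    have h3 : (k : Int) % 3 = 0 ∨ (k : Int) % 3 = 1 ∨ (k : Int) % 3 = 2 := by omega
    rcases h3 with h | h | h <;> simp [h, List.map_append]

-- per template, B's frames triple is A's three frames
lemma frames_eq (tmpl : List Char) :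
    pvFramesB tmpl = (pvFrameA tmpl 0, pvFrameA tmpl 1, pvFrameA tmpl 2) := by
  unfold pvFramesB pvFrameA
  simp only [PySem.List.foldl_append_singleton_eq_map, List.nil_append]
  by_cases h : 2 ≤ tmpl.length
  · have hm : ((tmpl.length : Int) - 2) = ((tmpl.length - 2 : Nat) : Int) := by omega
    rw [hm, dispatch tmpl (tmpl.length - 2)]
  · have hm : (tmpl.length : Int) - 2 ≤ 0 := by omega
    rw [PySem.List.pyRange_one_eq_nil hm]
    rw [PySem.List.pyRange_of_pos 0 _ (by norm_num : (0:Int) < 3),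
        PySem.List.pyRange_of_pos 1 _ (by norm_num : (0:Int) < 3),
        PySem.List.pyRange_of_pos 2 _ (by norm_num : (0:Int) < 3)]
    rw [if_neg (by omega), if_neg (by omega), if_neg (by omega)]
    simp

-- ===== VERDICT (by name: the statement is the Claim_ definition above) =====
theorem ORF_generation_spec : Claim_equal_ORF_generation := by
  intro strand _ _
  show ORF_generation strand = ORF_generation_alt strand
  unfold ORF_generation ORF_generation_alt
  have hr : PySem.List.pyRange 0 3 1 = [0, 1, 2] := by decide
  simp only [hr, List.foldl_cons, List.foldl_nil, pvComplement_eq, frames_eq]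
  simp
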